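-- pv_equiv track=rewrite | github.com/alvarodiegoprendes/ejercicios | Ejercicios y Proyectos Propios C++ y python/Visual Studio Code/paracaidista.py | Paracaidista
-- ===== SOURCE A (Python) =====
-- mov_filas  = [-1,0,1,0]
--
-- mov_columnas=[0,1,0,-1]
--
-- def Paracaidista(mapa,mask,k,pos_fila,pos_columna,total):
--     total=1
--     mask[pos_fila][pos_columna]=True
--     for i in range(len(mov_filas)):
--         paso_fila= pos_fila + mov_filas[i]
--         paso_columna = pos_columna + mov_columnas[i]
--         if (paso_fila>=0 and paso_fila<len(mapa) and paso_columna>=0 and paso_columna<len(mapa[0]) and not mask[paso_fila][paso_columna] and abs((mapa[pos_fila][pos_columna])-(mapa[paso_fila][paso_columna]))<=k):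
--
--             total += Paracaidista(mapa,mask,k,paso_fila,paso_columna,total)
--
--     return total
-- ===== SOURCE B (Python) =====
-- def Paracaidista(mapa, mask, k, pos_fila, pos_columna, total):
--     dr = (-1, 0, 1, 0)
--     dc = (0, 1, 0, -1)
--     mask[pos_fila][pos_columna] = True
--     count = 1
--     frames = [[pos_fila, pos_columna, 0]]
--     while frames:
--         r, c, i = frames[-1]
--         if i == 4:
--             frames.pop()
--             continue
--         frames[-1][2] = i + 1
--         nr, nc = r + dr[i], c + dc[i]
--         if (0 <= nr < len(mapa) and 0 <= nc < len(mapa[0])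
--                 and not mask[nr][nc]
--                 and abs(mapa[r][c] - mapa[nr][nc]) <= k):
--             mask[nr][nc] = True
--             count += 1
--             frames.append([nr, nc, 0])
--     return count
-- ===== Notes on version B (the rewrite author's own statement) =====
-- stated objective: alternative
-- what changed: Replaced A's self-recursive DFS by an iterative traversal with an explicit stack of (row, col, next-direction) frames, eliminating recursion (and its RecursionError risk on large regions) while visiting cells in the same order.
-- outside the precondition, e.g. on Paracaidista([[], [0]], [[], [True]], -1, -1, -1, -1): A returns 1, B returns 1; on Paracaidista([[5]], [[False, True]], 1, 0, 0, 0): A returns 1, B returns 1; on Paracaidista([], [[False]], 0, 0, 0, 0): A returns 1, B returns 1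
import Mathlib
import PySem

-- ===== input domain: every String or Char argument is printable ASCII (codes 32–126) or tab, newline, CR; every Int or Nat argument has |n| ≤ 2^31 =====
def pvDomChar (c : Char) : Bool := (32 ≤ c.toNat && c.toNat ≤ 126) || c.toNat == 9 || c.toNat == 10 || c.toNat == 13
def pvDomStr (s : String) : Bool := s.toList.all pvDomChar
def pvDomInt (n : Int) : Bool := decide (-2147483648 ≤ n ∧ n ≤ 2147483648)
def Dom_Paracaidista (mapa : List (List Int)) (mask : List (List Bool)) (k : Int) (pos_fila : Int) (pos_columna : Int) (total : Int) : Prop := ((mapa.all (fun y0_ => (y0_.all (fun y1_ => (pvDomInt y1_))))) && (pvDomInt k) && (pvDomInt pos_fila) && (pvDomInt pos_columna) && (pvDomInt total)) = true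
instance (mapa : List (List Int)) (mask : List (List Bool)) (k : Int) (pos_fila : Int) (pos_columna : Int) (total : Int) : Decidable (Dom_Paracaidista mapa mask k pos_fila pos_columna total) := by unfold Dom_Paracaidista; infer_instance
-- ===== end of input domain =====

-- B replaces A's self-recursive DFS by an iterative traversal over an explicit stack of
-- (row, col, next-direction) frames; both Pythons mutate `mask` in place identically —
-- the equivalence proved here is about the return value.

-- shared grid primitives used by both ports (Python's g[r][c] read and mask[r][c]=True write)
def gget {α : Type} (g : List (List α)) (r c : Int) : Option α :=
  (PySem.List.pyGet? g r).bind (fun row => PySem.List.pyGet? row c)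

def mset (g : List (List Bool)) (r c : Int) : List (List Bool) :=
  match PySem.List.pyGet? g r with
  | none => g
  | some row => PySem.List.pySetD g r (PySem.List.pySetD row c true)

def countFalse (g : List (List Bool)) : Nat := (g.map (fun row => row.count false)).sum

-- ===== PORT A =====
def movFilas : List Int := [-1, 0, 1, 0]
def movColumnas : List Int := [0, 1, 0, -1]

-- A's (and B's) neighbour condition, in the Python's order: bounds, not mask, |Δheight| ≤ k
-- (a raising lookup is treated as guard failure; inside Pre_ every lookup succeeds)
def vecino (mapa : List (List Int)) (k : Int) (m : List (List Bool)) (r c nr nc : Int) : Bool :=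
  decide (0 ≤ nr) && decide (nr < (mapa.length : Int)) && decide (0 ≤ nc) &&
    decide (nc < ((mapa.headD []).length : Int)) && (gget m nr nc == some false) &&
    (match gget mapa r c, gget mapa nr nc with
     | some a, some b => decide (|a - b| ≤ k)
     | _, _ => false)

-- the recursive DFS body of A; fuel only makes the recursion total (countFalse mask + 1 always suffices)
def dfsA (mapa : List (List Int)) (k : Int) : Nat → List (List Bool) → Int → Int → Int × List (List Bool)
  | 0, m, _, _ => (1, m)
  | f+1, m, r, c =>
    (PySem.List.pyRange 0 (movFilas.length : Int) 1).foldl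
      (fun acc i =>
        let nr := r + PySem.List.pyGetD movFilas i 0
        let nc := c + PySem.List.pyGetD movColumnas i 0
        if vecino mapa k acc.2 r c nr nc then
          let p := dfsA mapa k f acc.2 nr nc
          (acc.1 + p.1, p.2)
        else acc)
      (1, mset m r c)

def Paracaidista (mapa : List (List Int)) (mask : List (List Bool)) (k : Int) (pos_fila : Int) (pos_columna : Int) (total : Int) : Int :=
  (dfsA mapa k (countFalse mask + 1) mask pos_fila pos_columna).1

-- ===== PORT B =====
def drB : List Int := [-1, 0, 1, 0]
def dcB : List Int := [0, 1, 0, -1]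

-- Source B's while-loop over explicit frames (r, c, next dir index); stack head = top frame;
-- fuel only makes the loop total (5 * (countFalse mask + 1) + 1 always suffices)
def runF (mapa : List (List Int)) (k : Int) : Nat → List (Int × Int × Int) → List (List Bool) → Int → Int
  | 0, _, _, cnt => cnt
  | _+1, [], _, cnt => cnt
  | f+1, (r, c, i) :: rest, m, cnt =>
    if i == (4 : Int) then runF mapa k f rest m cnt
    else
      let nr := r + PySem.List.pyGetD drB i 0
      let nc := c + PySem.List.pyGetD dcB i 0
      if vecino mapa k m r c nr nc then
        runF mapa k f ((nr, nc, 0) :: (r, c, i + 1) :: rest) (mset m nr nc) (cnt + 1)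
      else runF mapa k f ((r, c, i + 1) :: rest) m cnt

def Paracaidista_alt (mapa : List (List Int)) (mask : List (List Bool)) (k : Int) (pos_fila : Int) (pos_columna : Int) (total : Int) : Int :=
  runF mapa k (5 * (countFalse mask + 1) + 1) [(pos_fila, pos_columna, 0)]
    (mset mask pos_fila pos_columna) 1

-- ===== PRECONDITION & SPEC =====
-- Pre_ restricts to well-formed calls — a nonempty rectangular height grid, a mask of identical
-- shape, and a start position inside Python's (possibly negative) index range; outside it A
-- usually raises IndexError, though on some ragged, mismatched or empty grids the traversal
-- happens to stay clear of the missing cells and A still returns.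
def Pre_Paracaidista (mapa : List (List Int)) (mask : List (List Bool)) (k : Int) (pos_fila : Int) (pos_columna : Int) (total : Int) : Prop :=
  (∀ row ∈ mapa, row.length = (mapa.headD []).length) ∧
  mask.length = mapa.length ∧
  (∀ row ∈ mask, row.length = (mapa.headD []).length) ∧
  -(mapa.length : Int) ≤ pos_fila ∧ pos_fila < (mapa.length : Int) ∧
  -((mapa.headD []).length : Int) ≤ pos_columna ∧ pos_columna < ((mapa.headD []).length : Int)

instance (mapa : List (List Int)) (mask : List (List Bool)) (k : Int) (pos_fila : Int) (pos_columna : Int) (total : Int) : Decidable (Pre_Paracaidista mapa mask k pos_fila pos_columna total) := by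
  unfold Pre_Paracaidista; infer_instance

def pvWitness_Paracaidista : List (List Int) × List (List Bool) × Int × Int × Int × Int :=
  ([[0, 1], [5, 2]], [[false, false], [false, false]], 1, 0, 0, 0)

def Spec_Paracaidista (mapa : List (List Int)) (mask : List (List Bool)) (k : Int) (pos_fila : Int) (pos_columna : Int) (total : Int) (out : Int) : Prop := out = Paracaidista_alt mapa mask k pos_fila pos_columna total
instance (mapa : List (List Int)) (mask : List (List Bool)) (k : Int) (pos_fila : Int) (pos_columna : Int) (total : Int) (out : Int) : Decidable (Spec_Paracaidista mapa mask k pos_fila pos_columna total out) := by unfold Spec_Paracaidista; infer_instance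

-- ===== CLAIM (what is proved, stated in full; the proofs are below) =====
def Claim_equal_Paracaidista : Prop := ∀ (mapa : List (List Int)) (mask : List (List Bool)) (k : Int) (pos_fila : Int) (pos_columna : Int) (total : Int), Dom_Paracaidista mapa mask k pos_fila pos_columna total → Pre_Paracaidista mapa mask k pos_fila pos_columna total → Spec_Paracaidista mapa mask k pos_fila pos_columna total (Paracaidista mapa mask k pos_fila pos_columna total)

-- ===== LEMMAS AND PROOFS =====

-- abbreviations for the proofs
def Rect (mapa : List (List Int)) : Prop := ∀ row ∈ mapa, row.length = (mapa.headD []).length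
def MInv (mapa : List (List Int)) (m : List (List Bool)) : Prop :=
  m.length = mapa.length ∧ ∀ row ∈ m, row.length = (mapa.headD []).length
def inb (mapa : List (List Int)) (r c : Int) : Prop :=
  0 ≤ r ∧ r < (mapa.length : Int) ∧ 0 ≤ c ∧ c < ((mapa.headD []).length : Int)
def cell (m : List (List Bool)) (r c : Int) : Bool := (m.getD r.toNat []).getD c.toNat true
def hgt (mapa : List (List Int)) (r c : Int) : Int := (mapa.getD r.toNat []).getD c.toNat 0
def dirsA : List (Int × Int) := [(-1, 0), (0, 1), (1, 0), (0, -1)]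

-- canonical (sufficient-fuel) forms used by the specification-level lemmas
def dfsS (mapa : List (List Int)) (k : Int) (m : List (List Bool)) (r c : Int) : Int × List (List Bool) :=
  dfsA mapa k (countFalse m + 1) m r c




-- cell/gget bridges (all indices are nonnegative and in bounds inside Pre_)
theorem gget_eq_cell (mapa : List (List Int)) (m : List (List Bool)) (r c : Int)
    (hI : MInv mapa m) (h : inb mapa r c) : gget m r c = some (cell m r c) := by
  obtain ⟨h1, h2, h3, h4⟩ := h
  have hr : r.toNat < m.length := by rw [hI.1]; omega
  have hrow : m[r.toNat].length = (mapa.headD []).length := hI.2 _ (List.getElem_mem hr)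
  have hc : c.toNat < m[r.toNat].length := by rw [hrow]; omega
  rw [gget, PySem.List.pyGet?_of_nonneg m h1, List.getElem?_eq_getElem hr]
  simp only [Option.bind_some]
  rw [PySem.List.pyGet?_of_nonneg _ h3, List.getElem?_eq_getElem hc]
  rw [cell, List.getD_eq_getElem m [] hr, List.getD_eq_getElem _ true hc]

theorem gget_mapa_eq_hgt (mapa : List (List Int)) (r c : Int)
    (hR : Rect mapa) (h : inb mapa r c) : gget mapa r c = some (hgt mapa r c) := by
  obtain ⟨h1, h2, h3, h4⟩ := h
  have hr : r.toNat < mapa.length := by omega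
  have hrow : mapa[r.toNat].length = (mapa.headD []).length := hR _ (List.getElem_mem hr)
  have hc : c.toNat < mapa[r.toNat].length := by rw [hrow]; omega
  rw [gget, PySem.List.pyGet?_of_nonneg mapa h1, List.getElem?_eq_getElem hr]
  simp only [Option.bind_some]
  rw [PySem.List.pyGet?_of_nonneg _ h3, List.getElem?_eq_getElem hc]
  rw [hgt, List.getD_eq_getElem mapa [] hr, List.getD_eq_getElem _ 0 hc]

theorem mset_eq (mapa : List (List Int)) (m : List (List Bool)) (r c : Int)
    (hI : MInv mapa m) (h : inb mapa r c) :
    mset m r c = m.set r.toNat ((m.getD r.toNat []).set c.toNat true) := by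
  have hr : r.toNat < m.length := by rw [hI.1]; obtain ⟨a, b, cc, d⟩ := h; omega
  rw [mset, PySem.List.pyGet?_of_nonneg m h.1, List.getElem?_eq_getElem hr]
  simp only []
  rw [PySem.List.pySetD_of_nonneg _ _ h.2.2.1, PySem.List.pySetD_of_nonneg _ _ h.1,
    List.getD_eq_getElem m [] hr]

theorem MInv_mset (mapa : List (List Int)) (m : List (List Bool)) (r c : Int)
    (hI : MInv mapa m) (h : inb mapa r c) : MInv mapa (mset m r c) := by
  rw [mset_eq mapa m r c hI h]
  have hr : r.toNat < m.length := by rw [hI.1]; obtain ⟨a, b, cc, d⟩ := h; omega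
  refine ⟨by simpa using hI.1, ?_⟩
  intro row hmem
  rcases List.mem_or_eq_of_mem_set hmem with hin | heq
  · exact hI.2 _ hin
  · subst heq
    rw [List.length_set, List.getD_eq_getElem m [] hr]
    exact hI.2 _ (List.getElem_mem hr)

theorem cell_mset_self (mapa : List (List Int)) (m : List (List Bool)) (r c : Int)
    (hI : MInv mapa m) (h : inb mapa r c) : cell (mset m r c) r c = true := by
  have hr : r.toNat < m.length := by rw [hI.1]; obtain ⟨a, b, cc, d⟩ := h; omega
  have hrow : m[r.toNat].length = (mapa.headD []).length := hI.2 _ (List.getElem_mem hr)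
  have hc : c.toNat < m[r.toNat].length := by rw [hrow]; obtain ⟨a, b, cc, d⟩ := h; omega
  rw [mset_eq mapa m r c hI h, cell]
  rw [List.getD_eq_getElem _ [] (by simpa using hr), List.getElem_set_self]
  rw [List.getD_eq_getElem m [] hr]
  rw [List.getD_eq_getElem _ true (by simpa using hc), List.getElem_set_self]

theorem cell_mset_ne (mapa : List (List Int)) (m : List (List Bool)) (r c x y : Int)
    (hI : MInv mapa m) (h : inb mapa r c) (hx : inb mapa x y)
    (hne : ¬(x = r ∧ y = c)) : cell (mset m r c) x y = cell m x y := by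
  have hr : r.toNat < m.length := by rw [hI.1]; obtain ⟨a, b, cc, d⟩ := h; omega
  rw [mset_eq mapa m r c hI h, cell, cell]
  by_cases hxr : x = r
  · subst hxr
    have hyc : y ≠ c := fun hh => hne ⟨rfl, hh⟩
    have hyn : y.toNat ≠ c.toNat := by obtain ⟨a, b, cc, d⟩ := h; obtain ⟨a2, b2, c2, d2⟩ := hx; omega
    rw [List.getD_eq_getElem _ [] (by simpa using hr), List.getElem_set_self]
    rw [List.getD_eq_getElem m [] hr]
    have hrow : m[x.toNat].length = (mapa.headD []).length := hI.2 _ (List.getElem_mem hr)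
    have hy : y.toNat < m[x.toNat].length := by rw [hrow]; obtain ⟨a2, b2, c2, d2⟩ := hx; omega
    rw [List.getD_eq_getElem _ true (by simpa using hy), List.getD_eq_getElem _ true hy,
      List.getElem_set_ne (by omega)]
  · have hxn : x.toNat ≠ r.toNat := by obtain ⟨a, b, cc, d⟩ := h; obtain ⟨a2, b2, c2, d2⟩ := hx; omega
    have hxl : x.toNat < m.length := by rw [hI.1]; obtain ⟨a2, b2, c2, d2⟩ := hx; omega
    rw [List.getD_eq_getElem _ [] (by simpa using hxl), List.getElem_set_ne (by omega),
      List.getD_eq_getElem m [] hxl]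

-- counting lemmas
theorem count_set_of_false (row : List Bool) : ∀ j (hj : j < row.length), row[j] = false →
    (row.set j true).count false + 1 = row.count false := by
  induction row with
  | nil => intro j hj; simp at hj
  | cons a t ih =>
    intro j hj hv
    cases j with
    | zero => simp at hv; subst hv; simp [List.count_cons]
    | succ n =>
      have hn : n < t.length := by simpa using hj
      have H := ih n hn (by simpa using hv)
      cases a <;> simp [List.set, List.count_cons] at H ⊢ <;> omega

theorem count_set_of_true (row : List Bool) : ∀ j (hj : j < row.length), row[j] = true →
    (row.set j true).count false = row.count false := by
  induction row with
  | nil => intro j hj; simp at hj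
  | cons a t ih =>
    intro j hj hv
    cases j with
    | zero => simp at hv; subst hv; simp [List.count_cons]
    | succ n =>
      have hn : n < t.length := by simpa using hj
      have H := ih n hn (by simpa using hv)
      cases a <;> simp [List.set, List.count_cons] at H ⊢ <;> omega

theorem countFalse_set (m : List (List Bool)) : ∀ i (hi : i < m.length) (row : List Bool),
    countFalse (m.set i row) + m[i].count false = countFalse m + row.count false := by
  induction m with
  | nil => intro i hi; simp at hi
  | cons a t ih =>
    intro i hi row
    cases i with
    | zero => simp [countFalse]; omega
    | succ n =>
      have hn : n < t.length := by simpa using hi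
      have H := ih n hn row
      simp [List.set, countFalse] at H ⊢
      omega

theorem countFalse_mset_false (mapa : List (List Int)) (m : List (List Bool)) (r c : Int)
    (hI : MInv mapa m) (h : inb mapa r c) (hc : cell m r c = false) :
    countFalse (mset m r c) + 1 = countFalse m := by
  have hr : r.toNat < m.length := by rw [hI.1]; obtain ⟨a, b, cc, d⟩ := h; omega
  have hrow : m[r.toNat].length = (mapa.headD []).length := hI.2 _ (List.getElem_mem hr)
  have hcl : c.toNat < m[r.toNat].length := by rw [hrow]; obtain ⟨a, b, cc, d⟩ := h; omega
  have hgd : m.getD r.toNat [] = m[r.toNat] := List.getD_eq_getElem m [] hr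
  have h1 := countFalse_set m r.toNat hr (m[r.toNat].set c.toNat true)
  rw [cell, hgd, List.getD_eq_getElem _ true hcl] at hc
  have h2 := count_set_of_false m[r.toNat] c.toNat hcl hc
  rw [mset_eq mapa m r c hI h, hgd]
  omega

theorem countFalse_mset_true (mapa : List (List Int)) (m : List (List Bool)) (r c : Int)
    (hI : MInv mapa m) (h : inb mapa r c) (hc : cell m r c = true) :
    countFalse (mset m r c) = countFalse m := by
  have hr : r.toNat < m.length := by rw [hI.1]; obtain ⟨a, b, cc, d⟩ := h; omega
  have hrow : m[r.toNat].length = (mapa.headD []).length := hI.2 _ (List.getElem_mem hr)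
  have hcl : c.toNat < m[r.toNat].length := by rw [hrow]; obtain ⟨a, b, cc, d⟩ := h; omega
  have hgd : m.getD r.toNat [] = m[r.toNat] := List.getD_eq_getElem m [] hr
  have h1 := countFalse_set m r.toNat hr (m[r.toNat].set c.toNat true)
  rw [cell, hgd, List.getD_eq_getElem _ true hcl] at hc
  have h2 := count_set_of_true m[r.toNat] c.toNat hcl hc
  rw [mset_eq mapa m r c hI h, hgd]
  omega

theorem countFalse_mset_le (mapa : List (List Int)) (m : List (List Bool)) (r c : Int)
    (hI : MInv mapa m) (h : inb mapa r c) : countFalse (mset m r c) ≤ countFalse m := by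
  cases hc : cell m r c
  · have := countFalse_mset_false mapa m r c hI h hc; omega
  · have := countFalse_mset_true mapa m r c hI h hc; omega

theorem countFalse_pos (mapa : List (List Int)) (m : List (List Bool)) (r c : Int)
    (hI : MInv mapa m) (h : inb mapa r c) (hc : cell m r c = false) :
    1 ≤ countFalse m := by
  have hr : r.toNat < m.length := by rw [hI.1]; obtain ⟨a, b, cc, d⟩ := h; omega
  have hrow : m[r.toNat].length = (mapa.headD []).length := hI.2 _ (List.getElem_mem hr)
  have hcl : c.toNat < m[r.toNat].length := by rw [hrow]; obtain ⟨a, b, cc, d⟩ := h; omega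
  rw [cell, List.getD_eq_getElem m [] hr, List.getD_eq_getElem _ true hcl] at hc
  have hmem : false ∈ m[r.toNat] := by rw [← hc]; exact List.getElem_mem hcl
  have h1 : 1 ≤ m[r.toNat].count false := List.one_le_count_iff.mpr hmem
  have h2 : m[r.toNat].count false ∈ m.map (fun row => row.count false) :=
    List.mem_map_of_mem (List.getElem_mem hr)
  calc 1 ≤ m[r.toNat].count false := h1
    _ ≤ countFalse m := List.le_sum_of_mem h2

-- monotonicity of marking: a true cell stays true
theorem cell_mset_mono (mapa : List (List Int)) (m : List (List Bool)) (r c x y : Int)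
    (hI : MInv mapa m) (h : inb mapa r c) (hx : inb mapa x y)
    (ht : cell m x y = true) : cell (mset m r c) x y = true := by
  by_cases he : x = r ∧ y = c
  · obtain ⟨he1, he2⟩ := he; subst he1; subst he2; exact cell_mset_self mapa m x y hI h
  · rw [cell_mset_ne mapa m r c x y hI h hx he]; exact ht


-- characterization of the shared neighbour guard
theorem vecino_iff (mapa : List (List Int)) (k : Int) (m : List (List Bool)) (r c nr nc : Int)
    (hR : Rect mapa) (hI : MInv mapa m) (hin : inb mapa r c) :
    vecino mapa k m r c nr nc = true ↔
      (inb mapa nr nc ∧ cell m nr nc = false ∧ |hgt mapa r c - hgt mapa nr nc| ≤ k) := by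
  rw [vecino]
  simp only [Bool.and_eq_true, decide_eq_true_eq, beq_iff_eq]
  constructor
  · rintro ⟨⟨⟨⟨⟨hb1, hb2⟩, hb3⟩, hb4⟩, hm⟩, hh⟩
    have hinn : inb mapa nr nc := ⟨hb1, hb2, hb3, hb4⟩
    refine ⟨hinn, ?_, ?_⟩
    · rw [gget_eq_cell mapa m nr nc hI hinn] at hm
      exact (Option.some_injective _ hm.symm).symm
    · rw [gget_mapa_eq_hgt mapa r c hR hin, gget_mapa_eq_hgt mapa nr nc hR hinn] at hh
      simpa using hh
  · rintro ⟨hinn, hm, hh⟩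
    obtain ⟨hb1, hb2, hb3, hb4⟩ := hinn
    refine ⟨⟨⟨⟨⟨hb1, hb2⟩, hb3⟩, hb4⟩, ?_⟩, ?_⟩
    · rw [gget_eq_cell mapa m nr nc hI ⟨hb1, hb2, hb3, hb4⟩, hm]
    · rw [gget_mapa_eq_hgt mapa r c hR hin, gget_mapa_eq_hgt mapa nr nc hR ⟨hb1, hb2, hb3, hb4⟩]
      simpa using hh

theorem vecino_inb (mapa : List (List Int)) (k : Int) (m : List (List Bool)) (r c nr nc : Int)
    (hv : vecino mapa k m r c nr nc = true) : inb mapa nr nc := by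
  rw [vecino] at hv
  simp only [Bool.and_eq_true, decide_eq_true_eq] at hv
  exact ⟨hv.1.1.1.1.1, hv.1.1.1.1.2, hv.1.1.1.2, hv.1.1.2⟩

-- the recursive case of port A, with the four directions written out as pairs
theorem dfsA_succ (mapa : List (List Int)) (k : Int) (f : Nat) (m : List (List Bool)) (r c : Int) :
    dfsA mapa k (f + 1) m r c =
      dirsA.foldl
        (fun acc d =>
          if vecino mapa k acc.2 r c (r + d.1) (c + d.2) then
            let p := dfsA mapa k f acc.2 (r + d.1) (c + d.2)
            (acc.1 + p.1, p.2)
          else acc)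
        (1, mset m r c) := by
  have hrange : PySem.List.pyRange 0 (movFilas.length : Int) 1 = [(0 : Int), 1, 2, 3] := by decide
  rw [dfsA, hrange]
  rfl


-- invariants of A's DFS: shape is preserved, marks only grow, countFalse never increases
theorem dfsA_inv (mapa : List (List Int)) (k : Int) :
    ∀ (f : Nat) (m : List (List Bool)) (r c : Int), Rect mapa → MInv mapa m → inb mapa r c →
      MInv mapa (dfsA mapa k f m r c).2 ∧ countFalse (dfsA mapa k f m r c).2 ≤ countFalse m ∧
      (∀ x y, inb mapa x y → cell m x y = true → cell (dfsA mapa k f m r c).2 x y = true) := by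
  intro f
  induction f with
  | zero =>
    intro m r c _ hI _
    exact ⟨hI, le_refl _, fun x y _ ht => ht⟩
  | succ f ih =>
    intro m r c hR hI hin
    rw [dfsA_succ]
    have base : MInv mapa (mset m r c) ∧ countFalse (mset m r c) ≤ countFalse m ∧
        (∀ x y, inb mapa x y → cell m x y = true → cell (mset m r c) x y = true) :=
      ⟨MInv_mset mapa m r c hI hin, countFalse_mset_le mapa m r c hI hin,
        fun x y hxy ht => cell_mset_mono mapa m r c x y hI hin hxy ht⟩
    suffices aux : ∀ (ds : List (Int × Int)) (acc : Int × List (List Bool)),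
        (MInv mapa acc.2 ∧ countFalse acc.2 ≤ countFalse m ∧
          (∀ x y, inb mapa x y → cell m x y = true → cell acc.2 x y = true)) →
        (MInv mapa (ds.foldl (fun acc d =>
            if vecino mapa k acc.2 r c (r + d.1) (c + d.2) then
              let p := dfsA mapa k f acc.2 (r + d.1) (c + d.2)
              (acc.1 + p.1, p.2)
            else acc) acc).2 ∧
          countFalse (ds.foldl (fun acc d =>
            if vecino mapa k acc.2 r c (r + d.1) (c + d.2) then
              let p := dfsA mapa k f acc.2 (r + d.1) (c + d.2)
              (acc.1 + p.1, p.2)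
            else acc) acc).2 ≤ countFalse m ∧
          (∀ x y, inb mapa x y → cell m x y = true → cell (ds.foldl (fun acc d =>
            if vecino mapa k acc.2 r c (r + d.1) (c + d.2) then
              let p := dfsA mapa k f acc.2 (r + d.1) (c + d.2)
              (acc.1 + p.1, p.2)
            else acc) acc).2 x y = true)) by
      exact aux dirsA (1, mset m r c) base
    intro ds
    induction ds with
    | nil => intro acc h; exact h
    | cons d ds ihds =>
      intro acc hacc
      simp only [List.foldl_cons]
      by_cases hv : vecino mapa k acc.2 r c (r + d.1) (c + d.2) = true
      · rw [if_pos hv]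
        have hinn := vecino_inb mapa k acc.2 r c (r + d.1) (c + d.2) hv
        have h3 := ih acc.2 (r + d.1) (c + d.2) hR hacc.1 hinn
        exact ihds _ ⟨h3.1, le_trans h3.2.1 hacc.2.1,
          fun x y hxy ht => h3.2.2 x y hxy (hacc.2.2 x y hxy ht)⟩
      · rw [if_neg hv]; exact ihds _ hacc

-- with sufficient fuel the result does not depend on the fuel
theorem dfsA_fuel (mapa : List (List Int)) (k : Int) :
    ∀ (N : Nat) (m : List (List Bool)) (r c : Int) (f1 f2 : Nat), Rect mapa → MInv mapa m →
      inb mapa r c → cell m r c = false → countFalse m = N → N ≤ f1 → N ≤ f2 →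
      dfsA mapa k f1 m r c = dfsA mapa k f2 m r c := by
  intro N
  induction N using Nat.strong_induction_on with
  | _ N ihN =>
    intro m r c f1 f2 hR hI hin hc hN hf1 hf2
    have hpos : 1 ≤ N := hN ▸ countFalse_pos mapa m r c hI hin hc
    obtain ⟨g1, rfl⟩ : ∃ g, f1 = g + 1 := ⟨f1 - 1, by omega⟩
    obtain ⟨g2, rfl⟩ : ∃ g, f2 = g + 1 := ⟨f2 - 1, by omega⟩
    rw [dfsA_succ, dfsA_succ]
    have hm1I : MInv mapa (mset m r c) := MInv_mset mapa m r c hI hin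
    have hm1c : countFalse (mset m r c) + 1 = countFalse m :=
      countFalse_mset_false mapa m r c hI hin hc
    suffices aux : ∀ (ds : List (Int × Int)) (acc : Int × List (List Bool)),
        MInv mapa acc.2 → countFalse acc.2 ≤ N - 1 →
        ds.foldl (fun acc d =>
            if vecino mapa k acc.2 r c (r + d.1) (c + d.2) then
              let p := dfsA mapa k g1 acc.2 (r + d.1) (c + d.2)
              (acc.1 + p.1, p.2)
            else acc) acc =
        ds.foldl (fun acc d =>
            if vecino mapa k acc.2 r c (r + d.1) (c + d.2) then
              let p := dfsA mapa k g2 acc.2 (r + d.1) (c + d.2)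
              (acc.1 + p.1, p.2)
            else acc) acc by
      have hle : countFalse (mset m r c) ≤ N - 1 := by omega
      exact aux dirsA (1, mset m r c) hm1I hle
    intro ds
    induction ds with
    | nil => intro acc _ _; rfl
    | cons d ds ihds =>
      intro acc haccI haccC
      simp only [List.foldl_cons]
      by_cases hv : vecino mapa k acc.2 r c (r + d.1) (c + d.2) = true
      · rw [if_pos hv, if_pos hv]
        have hinn := vecino_inb mapa k acc.2 r c (r + d.1) (c + d.2) hv
        have hcc : cell acc.2 (r + d.1) (c + d.2) = false :=
          ((vecino_iff mapa k acc.2 r c (r + d.1) (c + d.2) hR haccI hin).mp hv).2.1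
        have heq : dfsA mapa k g1 acc.2 (r + d.1) (c + d.2) =
            dfsA mapa k g2 acc.2 (r + d.1) (c + d.2) :=
          ihN (countFalse acc.2) (by omega) acc.2 (r + d.1) (c + d.2) g1 g2 hR haccI hinn hcc
            rfl (by omega) (by omega)
        rw [heq]
        have h3 := dfsA_inv mapa k g2 acc.2 (r + d.1) (c + d.2) hR haccI hinn
        exact ihds _ h3.1 (le_trans h3.2.1 haccC)
      · rw [if_neg hv, if_neg hv]; exact ihds _ haccI haccC

theorem dfsA_eq_dfsS (mapa : List (List Int)) (k : Int) (f : Nat) (m : List (List Bool)) (r c : Int)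
    (hR : Rect mapa) (hI : MInv mapa m) (hin : inb mapa r c) (hc : cell m r c = false)
    (hf : countFalse m ≤ f) : dfsA mapa k f m r c = dfsS mapa k m r c :=
  dfsA_fuel mapa k (countFalse m) m r c f (countFalse m + 1) hR hI hin hc rfl hf (by omega)

-- Python's negative-index wrap, and normalization of the shared primitives at wrapped positions
def wIdx (n : Nat) (i : Int) : Int := if i < 0 then i + n else i
def inbW (mapa : List (List Int)) (r c : Int) : Prop :=
  -(mapa.length : Int) ≤ r ∧ r < (mapa.length : Int) ∧
  -((mapa.headD []).length : Int) ≤ c ∧ c < ((mapa.headD []).length : Int)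

theorem inb_inbW (mapa : List (List Int)) (r c : Int) (h : inb mapa r c) : inbW mapa r c := by
  obtain ⟨h1, h2, h3, h4⟩ := h; exact ⟨by omega, h2, by omega, h4⟩

theorem inbW_wrap (mapa : List (List Int)) (r c : Int) (h : inbW mapa r c) :
    inb mapa (wIdx mapa.length r) (wIdx (mapa.headD []).length c) := by
  obtain ⟨h1, h2, h3, h4⟩ := h
  unfold wIdx inb
  split_ifs <;> omega

theorem pyIdx?_wrap (n : Nat) (i : Int) (h1 : -(n : Int) ≤ i) (h2 : i < (n : Int)) :
    PySem.List.pyIdx? n i = some (wIdx n i).toNat := by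
  simp only [PySem.List.pyIdx?, wIdx]
  split_ifs <;> first | omega | (congr 1 <;> omega)

theorem wIdx_nonneg (n : Nat) (i : Int) (h1 : -(n : Int) ≤ i) : 0 ≤ wIdx n i := by
  unfold wIdx; split_ifs <;> omega

theorem wIdx_lt (n : Nat) (i : Int) (h2 : i < (n : Int)) : wIdx n i < (n : Int) := by
  unfold wIdx; split_ifs <;> omega

theorem wIdx_id (n : Nat) (i : Int) (h : 0 ≤ i) : wIdx n i = i := by
  unfold wIdx; split_ifs <;> omega

theorem pyIdx?_wrap2 (n : Nat) (i : Int) (h1 : -(n : Int) ≤ i) (h2 : i < (n : Int)) :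
    PySem.List.pyIdx? n (wIdx n i) = some (wIdx n i).toNat := by
  rw [pyIdx?_wrap n (wIdx n i) (by have := wIdx_nonneg n i h1; omega) (wIdx_lt n i h2),
    wIdx_id n (wIdx n i) (wIdx_nonneg n i h1)]

theorem gget_wrap {α : Type} (g : List (List α)) (C : Nat) (r c : Int)
    (hrows : ∀ row ∈ g, row.length = C)
    (h1 : -(g.length : Int) ≤ r) (h2 : r < (g.length : Int))
    (h3 : -(C : Int) ≤ c) (h4 : c < (C : Int)) :
    gget g r c = gget g (wIdx g.length r) (wIdx C c) := by
  rw [gget, gget]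
  simp only [PySem.List.pyGet?]
  rw [pyIdx?_wrap g.length r h1 h2, pyIdx?_wrap2 g.length r h1 h2]
  simp only [Option.bind_some]
  cases hrow : g[(wIdx g.length r).toNat]? with
  | none => simp
  | some row =>
    have hmem : row ∈ g := List.mem_of_getElem? hrow
    have hlen : row.length = C := hrows row hmem
    simp only [Option.bind_some]
    rw [hlen, pyIdx?_wrap C c h3 h4, pyIdx?_wrap2 C c h3 h4]

theorem mset_wrap (g : List (List Bool)) (C : Nat) (r c : Int)
    (hrows : ∀ row ∈ g, row.length = C)
    (h1 : -(g.length : Int) ≤ r) (h2 : r < (g.length : Int))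
    (h3 : -(C : Int) ≤ c) (h4 : c < (C : Int)) :
    mset g r c = mset g (wIdx g.length r) (wIdx C c) := by
  have hout : PySem.List.pyGet? g r = PySem.List.pyGet? g (wIdx g.length r) := by
    simp only [PySem.List.pyGet?]
    rw [pyIdx?_wrap g.length r h1 h2, pyIdx?_wrap2 g.length r h1 h2]
  rw [mset, mset, ← hout]
  cases hg : PySem.List.pyGet? g r with
  | none => rfl
  | some row =>
    have hmem : row ∈ g := PySem.List.mem_of_pyGet?_eq_some g hg
    have hlen : row.length = C := hrows row hmem
    simp only [PySem.List.pySetD, PySem.List.pySet?]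
    rw [hlen, pyIdx?_wrap C c h3 h4, pyIdx?_wrap2 C c h3 h4,
      pyIdx?_wrap g.length r h1 h2, pyIdx?_wrap2 g.length r h1 h2]

-- wrapped-seed versions of the mask/grid facts (MInv gives every row length (mapa.headD []).length)
theorem mset_wrapW (mapa : List (List Int)) (m : List (List Bool)) (r c : Int)
    (hI : MInv mapa m) (h : inbW mapa r c) :
    mset m r c = mset m (wIdx mapa.length r) (wIdx (mapa.headD []).length c) := by
  obtain ⟨h1, h2, h3, h4⟩ := h
  rw [mset_wrap m ((mapa.headD []).length) r c hI.2 (by rw [hI.1]; omega) (by rw [hI.1]; omega)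
    h3 h4, hI.1]

theorem MInv_msetW (mapa : List (List Int)) (m : List (List Bool)) (r c : Int)
    (hI : MInv mapa m) (h : inbW mapa r c) : MInv mapa (mset m r c) := by
  rw [mset_wrapW mapa m r c hI h]
  exact MInv_mset mapa m _ _ hI (inbW_wrap mapa r c h)

theorem countFalse_msetW_le (mapa : List (List Int)) (m : List (List Bool)) (r c : Int)
    (hI : MInv mapa m) (h : inbW mapa r c) : countFalse (mset m r c) ≤ countFalse m := by
  rw [mset_wrapW mapa m r c hI h]
  exact countFalse_mset_le mapa m _ _ hI (inbW_wrap mapa r c h)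

theorem gget_mapa_hgtW (mapa : List (List Int)) (r c : Int)
    (hR : Rect mapa) (h : inbW mapa r c) :
    gget mapa r c = some (hgt mapa (wIdx mapa.length r) (wIdx (mapa.headD []).length c)) := by
  obtain ⟨h1, h2, h3, h4⟩ := h
  rw [gget_wrap mapa ((mapa.headD []).length) r c hR h1 h2 h3 h4]
  exact gget_mapa_eq_hgt mapa _ _ hR (inbW_wrap mapa r c ⟨h1, h2, h3, h4⟩)

-- neighbour guard with a possibly wrapped parent
theorem vecino_iffW (mapa : List (List Int)) (k : Int) (m : List (List Bool)) (r c nr nc : Int)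
    (hR : Rect mapa) (hI : MInv mapa m) (hin : inbW mapa r c) :
    vecino mapa k m r c nr nc = true ↔
      (inb mapa nr nc ∧ cell m nr nc = false ∧
        |hgt mapa (wIdx mapa.length r) (wIdx (mapa.headD []).length c) - hgt mapa nr nc| ≤ k) := by
  rw [vecino]
  simp only [Bool.and_eq_true, decide_eq_true_eq, beq_iff_eq]
  constructor
  · rintro ⟨⟨⟨⟨⟨hb1, hb2⟩, hb3⟩, hb4⟩, hm⟩, hh⟩
    have hinn : inb mapa nr nc := ⟨hb1, hb2, hb3, hb4⟩
    refine ⟨hinn, ?_, ?_⟩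
    · rw [gget_eq_cell mapa m nr nc hI hinn] at hm
      exact (Option.some_injective _ hm.symm).symm
    · rw [gget_mapa_hgtW mapa r c hR hin, gget_mapa_eq_hgt mapa nr nc hR hinn] at hh
      simpa using hh
  · rintro ⟨hinn, hm, hh⟩
    obtain ⟨hb1, hb2, hb3, hb4⟩ := hinn
    refine ⟨⟨⟨⟨⟨hb1, hb2⟩, hb3⟩, hb4⟩, ?_⟩, ?_⟩
    · rw [gget_eq_cell mapa m nr nc hI ⟨hb1, hb2, hb3, hb4⟩, hm]
    · rw [gget_mapa_hgtW mapa r c hR hin, gget_mapa_eq_hgt mapa nr nc hR ⟨hb1, hb2, hb3, hb4⟩]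
      simpa using hh

-- spec-level sequential processing: the remaining directions of one visit, and a list of frames
def dfsRest (mapa : List (List Int)) (k : Int) (r c : Int) :
    List (Int × Int) → List (List Bool) → Int × List (List Bool)
  | [], m => (0, m)
  | d :: ds, m =>
    if vecino mapa k m r c (r + d.1) (c + d.2) then
      let p := dfsS mapa k m (r + d.1) (c + d.2)
      let q := dfsRest mapa k r c ds p.2
      (p.1 + q.1, q.2)
    else dfsRest mapa k r c ds m

def foldF (mapa : List (List Int)) (k : Int) :
    List (Int × Int × Int) → List (List Bool) → Int × List (List Bool)
  | [], m => (0, m)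
  | (r, c, i) :: rest, m =>
    let a := dfsRest mapa k r c (dirsA.drop i.toNat) m
    let b := foldF mapa k rest a.2
    (a.1 + b.1, b.2)

-- one visit of A = count 1, mark, then process the four directions sequentially
theorem key_dfsS (mapa : List (List Int)) (k : Int) (m : List (List Bool)) (r c : Int)
    (hR : Rect mapa) (hI : MInv mapa m) (hin : inbW mapa r c) :
    dfsS mapa k m r c =
      (1 + (dfsRest mapa k r c dirsA (mset m r c)).1, (dfsRest mapa k r c dirsA (mset m r c)).2) := by
  rw [dfsS, dfsA_succ]
  suffices aux : ∀ (ds : List (Int × Int)) (acc : Int × List (List Bool)),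
      MInv mapa acc.2 → countFalse acc.2 ≤ countFalse m →
      ds.foldl (fun acc d =>
          if vecino mapa k acc.2 r c (r + d.1) (c + d.2) then
            let p := dfsA mapa k (countFalse m) acc.2 (r + d.1) (c + d.2)
            (acc.1 + p.1, p.2)
          else acc) acc =
        (acc.1 + (dfsRest mapa k r c ds acc.2).1, (dfsRest mapa k r c ds acc.2).2) by
    have h1 : MInv mapa (mset m r c) := MInv_msetW mapa m r c hI hin
    have h2 : countFalse (mset m r c) ≤ countFalse m := countFalse_msetW_le mapa m r c hI hin
    exact aux dirsA (1, mset m r c) h1 h2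
  intro ds
  induction ds with
  | nil => intro acc _ _; simp [dfsRest]
  | cons d ds ihds =>
    intro acc haccI haccC
    simp only [List.foldl_cons, dfsRest]
    by_cases hv : vecino mapa k acc.2 r c (r + d.1) (c + d.2) = true
    · rw [if_pos hv, if_pos hv]
      have hinn := vecino_inb mapa k acc.2 r c (r + d.1) (c + d.2) hv
      have hcf : cell acc.2 (r + d.1) (c + d.2) = false :=
        ((vecino_iffW mapa k acc.2 r c (r + d.1) (c + d.2) hR haccI hin).mp hv).2.1
      have hpe : dfsA mapa k (countFalse m) acc.2 (r + d.1) (c + d.2) =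
          dfsS mapa k acc.2 (r + d.1) (c + d.2) :=
        dfsA_eq_dfsS mapa k (countFalse m) acc.2 (r + d.1) (c + d.2) hR haccI hinn hcf haccC
      rw [hpe]
      have hdinv := dfsA_inv mapa k (countFalse acc.2 + 1) acc.2 (r + d.1) (c + d.2) hR haccI hinn
      have ihres := ihds ((acc.1 + (dfsS mapa k acc.2 (r + d.1) (c + d.2)).1,
          (dfsS mapa k acc.2 (r + d.1) (c + d.2)).2)) hdinv.1 (le_trans hdinv.2.1 haccC)
      rw [ihres]
      simp [add_assoc]
    · rw [if_neg hv, if_neg hv]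
      exact ihds acc haccI haccC

-- the direction tables of the two ports, evaluated
theorem pyGetD_dir (i : Nat) (h : i < 4) :
    (PySem.List.pyGetD drB (i : Int) 0 = (dirsA.getD i (0, 0)).1) ∧
    (PySem.List.pyGetD dcB (i : Int) 0 = (dirsA.getD i (0, 0)).2) := by
  interval_cases i <;> exact ⟨by decide, by decide⟩

def wsum (frames : List (Int × Int × Int)) : Nat :=
  (frames.map (fun p => 5 - p.2.2.toNat)).sum

-- the frame machine of B computes the sequential processing of its frames
theorem runF_eq_foldF (mapa : List (List Int)) (k : Int) :
    ∀ (f : Nat) (frames : List (Int × Int × Int)) (m : List (List Bool)) (cnt : Int),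
      Rect mapa → MInv mapa m →
      (∀ p ∈ frames, inbW mapa p.1 p.2.1 ∧ 0 ≤ p.2.2 ∧ p.2.2 ≤ 4) →
      5 * countFalse m + wsum frames < f →
      runF mapa k f frames m cnt = cnt + (foldF mapa k frames m).1 := by
  intro f
  induction f with
  | zero => intro frames m cnt _ _ _ hlt; omega
  | succ f ihf =>
    intro frames m cnt hR hI hwf hlt
    match frames with
    | [] => simp [runF, foldF]
    | (r, c, i) :: rest =>
      obtain ⟨hin, hi0', hi4'⟩ := hwf (r, c, i) (List.mem_cons_self)
      have hi0 : (0 : Int) ≤ i := hi0'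
      have hi4 : i ≤ (4 : Int) := hi4'
      have hws : wsum ((r, c, i) :: rest) = (5 - i.toNat) + wsum rest := by
        show ((5 - i.toNat) :: rest.map (fun p => 5 - p.2.2.toNat)).sum = _
        simp [wsum]
      rw [hws] at hlt
      have hrest : ∀ p ∈ rest, inbW mapa p.1 p.2.1 ∧ 0 ≤ p.2.2 ∧ p.2.2 ≤ 4 :=
        fun p hp => hwf p (List.mem_cons_of_mem _ hp)
      by_cases h4 : i = 4
      · subst h4
        rw [runF, if_pos (by decide)]
        rw [ihf rest m cnt hR hI hrest (by omega)]
        have : foldF mapa k ((r, c, 4) :: rest) m = foldF mapa k rest m := by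
          simp [foldF, dfsRest, dirsA]
        rw [this]
      · have hi3 : i.toNat < 4 := by omega
        have hdir := pyGetD_dir i.toNat hi3
        have hcast : ((i.toNat : Int)) = i := by omega
        rw [hcast] at hdir
        have hdrop : dirsA.drop i.toNat =
            dirsA.getD i.toNat (0, 0) :: dirsA.drop (i.toNat + 1) := by
          rw [List.getD_eq_getElem dirsA (0, 0) (by simp [dirsA]; omega)]
          exact List.drop_eq_getElem_cons (by simp [dirsA]; omega)
        have hbumpN : (i + 1).toNat = i.toNat + 1 := by omega
        rw [runF, if_neg (by simpa using h4)]
        simp only [hdir.1, hdir.2]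
        set d := dirsA.getD i.toNat (0, 0) with hd
        by_cases hv : vecino mapa k m r c (r + d.1) (c + d.2) = true
        · rw [if_pos hv]
          have hinn := vecino_inb mapa k m r c (r + d.1) (c + d.2) hv
          have hcf : cell m (r + d.1) (c + d.2) = false :=
            ((vecino_iffW mapa k m r c (r + d.1) (c + d.2) hR hI hin).mp hv).2.1
          have hm1I : MInv mapa (mset m (r + d.1) (c + d.2)) :=
            MInv_mset mapa m _ _ hI hinn
          have hm1c : countFalse (mset m (r + d.1) (c + d.2)) + 1 = countFalse m :=
            countFalse_mset_false mapa m _ _ hI hinn hcf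
          have hwf2 : ∀ p ∈ ((r + d.1, c + d.2, (0 : Int)) :: (r, c, i + 1) :: rest),
              inbW mapa p.1 p.2.1 ∧ 0 ≤ p.2.2 ∧ p.2.2 ≤ 4 := by
            intro p hp
            rcases List.mem_cons.mp hp with hp1 | hp2
            · subst hp1
              exact ⟨inb_inbW mapa _ _ hinn, by show (0:Int) ≤ 0; omega, by show (0:Int) ≤ 4; omega⟩
            rcases List.mem_cons.mp hp2 with hp1 | hp3
            · subst hp1
              exact ⟨hin, by show (0:Int) ≤ i + 1; omega, by show i + 1 ≤ (4:Int); omega⟩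
            · exact hrest p hp3
          have hws2 : wsum ((r + d.1, c + d.2, (0 : Int)) :: (r, c, i + 1) :: rest) =
              5 + (5 - (i + 1).toNat) + wsum rest := by
            show ((5 - (0:Int).toNat) :: (5 - (i+1).toNat) :: rest.map (fun p => 5 - p.2.2.toNat)).sum = _
            simp [wsum]; omega
          rw [ihf _ _ (cnt + 1) hR hm1I hwf2 (by rw [hws2]; omega)]
          have hkey := key_dfsS mapa k m (r + d.1) (c + d.2) hR hI (inb_inbW mapa _ _ hinn)
          have hz : ((0 : Int)).toNat = 0 := rfl
          simp only [foldF, hz, List.drop_zero, hbumpN, hdrop, dfsRest, if_pos hv, hkey]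
          omega
        · rw [if_neg hv]
          have hwf2 : ∀ p ∈ ((r, c, i + 1) :: rest),
              inbW mapa p.1 p.2.1 ∧ 0 ≤ p.2.2 ∧ p.2.2 ≤ 4 := by
            intro p hp
            rcases List.mem_cons.mp hp with hp1 | hp3
            · subst hp1
              exact ⟨hin, by show (0:Int) ≤ i + 1; omega, by show i + 1 ≤ (4:Int); omega⟩
            · exact hrest p hp3
          have hws2 : wsum ((r, c, i + 1) :: rest) = (5 - (i + 1).toNat) + wsum rest := by
            show ((5 - (i+1).toNat) :: rest.map (fun p => 5 - p.2.2.toNat)).sum = _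
            simp [wsum]
          rw [ihf _ _ cnt hR hI hwf2 (by rw [hws2]; omega)]
          simp only [foldF, hbumpN, hdrop, dfsRest, if_neg hv]

-- ===== VERDICT (by name: the statement is the Claim_ definition above) =====
theorem Paracaidista_spec : Claim_equal_Paracaidista := by
  unfold Claim_equal_Paracaidista
  intro mapa mask k pos_fila pos_columna total _ hpre
  obtain ⟨hRect, hml, hmr, h1, h2, h3, h4⟩ := hpre
  have hI : MInv mapa mask := ⟨hml, hmr⟩
  have hin : inbW mapa pos_fila pos_columna := ⟨h1, h2, h3, h4⟩
  rw [Spec_Paracaidista]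
  show (dfsS mapa k mask pos_fila pos_columna).1 =
    runF mapa k (5 * (countFalse mask + 1) + 1) [(pos_fila, pos_columna, 0)]
      (mset mask pos_fila pos_columna) 1
  have hm1I : MInv mapa (mset mask pos_fila pos_columna) := MInv_msetW mapa mask _ _ hI hin
  have hm1le : countFalse (mset mask pos_fila pos_columna) ≤ countFalse mask :=
    countFalse_msetW_le mapa mask _ _ hI hin
  rw [runF_eq_foldF mapa k (5 * (countFalse mask + 1) + 1) [(pos_fila, pos_columna, 0)]
    (mset mask pos_fila pos_columna) 1 hRect hm1I
    (by intro p hp; simp at hp; subst hp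
        exact ⟨hin, by show (0:Int) ≤ 0; omega, by show (0:Int) ≤ 4; omega⟩)
    (by simp [wsum]; omega)]
  rw [key_dfsS mapa k mask pos_fila pos_columna hRect hI hin]
  show 1 + (dfsRest mapa k pos_fila pos_columna dirsA (mset mask pos_fila pos_columna)).1 =
    1 + (foldF mapa k [(pos_fila, pos_columna, 0)] (mset mask pos_fila pos_columna)).1
  simp [foldF, dirsA]
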